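-- pv_equiv track=rewrite | github.com/gradualgames/ggsound | ggsound_ca65/ft_txt_to_asm.py | generate_asm_from_bytes
-- ===== SOURCE A (Python) =====
-- define_byte_directive = "  .byte "
--
-- def generate_asm_from_bytes(bytes, bytes_per_line, start_line=define_byte_directive, byte_prefix="$"):
--
--     asm = ""
--     current_line = start_line
--     bytes_on_line = 0
--     for byte in bytes:
--         if byte < 0:
--             byte = 256 + byte
--         if current_line == start_line:
--             current_line += byte_prefix + format(byte, '02x')
--             bytes_on_line += 1
--         else:
--             current_line += "," + byte_prefix + format(byte, '02x')
--             bytes_on_line += 1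
--         if bytes_on_line >= bytes_per_line:
--             asm += current_line + '\n'
--             current_line = start_line
--             bytes_on_line = 0
--     if bytes_on_line > 0:
--         asm += current_line + '\n'
--
--     return asm
-- ===== SOURCE B (Python) =====
-- define_byte_directive = "  .byte "
--
-- def generate_asm_from_bytes(bytes, bytes_per_line, start_line=define_byte_directive, byte_prefix="$"):
--     step = bytes_per_line if bytes_per_line > 1 else 1
--     parts = []
--     i = 0
--     n = len(bytes)
--     while i < n:
--         parts.append(start_line)
--         parts.append(",".join(byte_prefix + format(256 + b if b < 0 else b, '02x') for b in bytes[i:i+step]))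
--         parts.append("\n")
--         i += step
--     return "".join(parts)
-- ===== Notes on version B (the rewrite author's own statement) =====
-- stated objective: idiomatic
-- what changed: Replaces the running current_line/bytes_on_line counters with conditional flush by slicing the input into fixed-size chunks (clamping the chunk size to at least 1) and joining each chunk's formatted bytes with ','.
import Mathlib
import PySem

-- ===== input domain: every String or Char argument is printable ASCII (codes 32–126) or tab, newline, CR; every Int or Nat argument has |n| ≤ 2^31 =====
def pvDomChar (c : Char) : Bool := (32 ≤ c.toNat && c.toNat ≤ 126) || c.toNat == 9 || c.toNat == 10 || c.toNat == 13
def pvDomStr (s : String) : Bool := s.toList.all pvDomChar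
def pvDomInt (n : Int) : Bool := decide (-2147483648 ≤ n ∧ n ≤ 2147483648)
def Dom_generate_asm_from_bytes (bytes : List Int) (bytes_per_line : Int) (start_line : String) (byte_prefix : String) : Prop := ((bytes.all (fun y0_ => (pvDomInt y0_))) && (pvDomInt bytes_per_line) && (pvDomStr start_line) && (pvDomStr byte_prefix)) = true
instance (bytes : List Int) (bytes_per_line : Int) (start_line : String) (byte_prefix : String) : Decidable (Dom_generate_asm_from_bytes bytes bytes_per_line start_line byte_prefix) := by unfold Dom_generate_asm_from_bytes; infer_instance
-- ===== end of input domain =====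

-- B replaces A's running line/counter state and conditional flush by slicing the input
-- into fixed-size chunks (chunk size clamped to at least 1) and ','-joining each chunk.

-- shared helper: Python's format(n, '02x') (lowercase hex of |n|, '-' in front for n < 0,
-- zero-padded to width 2 with the sign staying in front — exact, hand-ported; Nat.toDigits 16
-- produces Python's lowercase hex digits and PySem zfill is Python's sign-aware '0' fill)
def pvFmt02x (n : Int) : String :=
  PySem.Str.zfill (String.ofList ((if n < 0 then ['-'] else []) ++ Nat.toDigits 16 n.natAbs)) 2

-- ===== PORT A =====
-- loop body of A's 'for byte in bytes', state (asm, current_line, bytes_on_line)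
def pvAStep (start_line byte_prefix : String) (bytes_per_line : Int)
    (st : String × String × Int) (byte : Int) : String × String × Int :=
  let asm := st.1
  let current_line := st.2.1
  let bytes_on_line := st.2.2
  let byte := if byte < 0 then 256 + byte else byte
  let (current_line, bytes_on_line) :=
    if current_line == start_line then
      (current_line ++ (byte_prefix ++ pvFmt02x byte), bytes_on_line + 1)
    else
      (current_line ++ ("," ++ byte_prefix ++ pvFmt02x byte), bytes_on_line + 1)
  if bytes_on_line ≥ bytes_per_line then (asm ++ current_line ++ "\n", start_line, 0)
  else (asm, current_line, bytes_on_line)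

def generate_asm_from_bytes (bytes : List Int) (bytes_per_line : Int) (start_line : String) (byte_prefix : String) : String :=
  let r := bytes.foldl (pvAStep start_line byte_prefix bytes_per_line) ("", start_line, 0)
  if r.2.2 > 0 then r.1 ++ r.2.1 ++ "\n" else r.1

-- ===== PORT B =====
-- step = bytes_per_line if bytes_per_line > 1 else 1
def pvStep (bytes_per_line : Int) : Nat := if bytes_per_line > 1 then bytes_per_line.toNat else 1

theorem pvStep_pos (bytes_per_line : Int) : 0 < pvStep bytes_per_line := by
  unfold pvStep; split <;> omega

-- the 'while i < n:' loop of Source B, collecting the output pieces; hs is only the termination fact step >= 1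
def pvAltGo (start_line byte_prefix : String) (step : Nat) (hs : 0 < step) (bytes : List Int) (i : Nat) : List String :=
  if h : i < bytes.length then
    start_line
      :: PySem.Str.join ","
          ((PySem.List.slice bytes (some (i : Int)) (some ((i : Int) + (step : Int)))).map
            (fun b => byte_prefix ++ pvFmt02x (if b < 0 then 256 + b else b)))
      :: "\n"
      :: pvAltGo start_line byte_prefix step hs bytes (i + step)
  else []
termination_by bytes.length - i
decreasing_by omega

def generate_asm_from_bytes_alt (bytes : List Int) (bytes_per_line : Int) (start_line : String) (byte_prefix : String) : String :=
  PySem.Str.join ""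
    (pvAltGo start_line byte_prefix (pvStep bytes_per_line) (pvStep_pos bytes_per_line) bytes 0)

-- ===== PRECONDITION & SPEC =====
def Spec_generate_asm_from_bytes (bytes : List Int) (bytes_per_line : Int) (start_line : String) (byte_prefix : String) (out : String) : Prop := out = generate_asm_from_bytes_alt bytes bytes_per_line start_line byte_prefix
instance (bytes : List Int) (bytes_per_line : Int) (start_line : String) (byte_prefix : String) (out : String) : Decidable (Spec_generate_asm_from_bytes bytes bytes_per_line start_line byte_prefix out) := by unfold Spec_generate_asm_from_bytes; infer_instance

-- ===== CLAIM (what is proved, stated in full; the proofs are below) =====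
def Claim_equal_generate_asm_from_bytes : Prop := ∀ (bytes : List Int) (bytes_per_line : Int) (start_line : String) (byte_prefix : String), Dom_generate_asm_from_bytes bytes bytes_per_line start_line byte_prefix → Spec_generate_asm_from_bytes bytes bytes_per_line start_line byte_prefix (generate_asm_from_bytes bytes bytes_per_line start_line byte_prefix)

-- ===== LEMMAS AND PROOFS =====

-- one formatted byte, as B maps it
def pvF (byte_prefix : String) (b : Int) : String :=
  byte_prefix ++ pvFmt02x (if b < 0 then 256 + b else b)

-- the ","-separated continuation of a line after its first byte
def pvCJ (byte_prefix : String) : List Int → String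
  | [] => ""
  | b :: c => ("," ++ pvF byte_prefix b) ++ pvCJ byte_prefix c

-- proof helper: B's output line by line, phrased on the not-yet-output suffix
def pvLines (start_line byte_prefix : String) (step : Nat) (hs : 0 < step) (rest : List Int) : String :=
  if h : rest = [] then ""
  else
    (start_line
      ++ PySem.Str.join "," ((rest.take step).map (fun b => byte_prefix ++ pvFmt02x (if b < 0 then 256 + b else b)))
      ++ "\n")
    ++ pvLines start_line byte_prefix step hs (rest.drop step)
termination_by rest.length
decreasing_by
  simp only [List.length_drop]
  have : 0 < rest.length := List.length_pos_iff.mpr h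
  omega

theorem pvFmt02x_ne (n : Int) : pvFmt02x n ≠ "" := by
  intro h
  have h1 := congrArg String.toList h
  simp only [pvFmt02x, PySem.Str.toList_zfill] at h1
  have h2 := congrArg List.length h1
  simp [PySem.Chars.length_zfill] at h2

theorem pv_append_ne_empty (s t : String) (h : t ≠ "") : s ++ t ≠ "" := by
  intro he
  have := congrArg String.length he
  simp [String.length_append] at this
  exact h this.2

theorem pv_append_ne_empty_left (s t : String) (h : s ≠ "") : s ++ t ≠ "" := by
  intro he
  have := congrArg String.length he
  simp [String.length_append] at this
  exact h this.1

theorem pvF_ne (byte_prefix : String) (b : Int) : pvF byte_prefix b ≠ "" :=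
  pv_append_ne_empty _ _ (pvFmt02x_ne _)

theorem pv_beq_append_self (s j : String) (h : j ≠ "") : ((s ++ j) == s) = false := by
  apply beq_eq_false_iff_ne.mpr
  intro he
  have := congrArg String.length he
  simp [String.length_append] at this
  exact h this

theorem pvFlush (bytes_per_line : Int) (k : Nat) :
    ((k : Int) + 1 ≥ bytes_per_line) ↔ (k + 1 ≥ pvStep bytes_per_line) := by
  unfold pvStep; split <;> omega

-- ",".join of a nonempty mapped chunk = first byte ++ comma-continuation
theorem pv_join_cons (byte_prefix : String) (b : Int) (c : List Int) :
    PySem.Str.join "," (pvF byte_prefix b :: c.map (pvF byte_prefix)) = pvF byte_prefix b ++ pvCJ byte_prefix c := by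
  induction c generalizing b with
  | nil =>
    apply String.toList_inj.mp
    simp [PySem.Str.toList_join, PySem.Chars.join_singleton, pvCJ]
  | cons b' c ih =>
    apply String.toList_inj.mp
    have hcc := PySem.Chars.join_cons_cons ",".toList (pvF byte_prefix b).toList
      (pvF byte_prefix b').toList ((c.map (pvF byte_prefix)).map String.toList)
    have ih' := congrArg String.toList (ih b')
    simp only [PySem.Str.toList_join, List.map_cons] at ih' ⊢
    rw [hcc, ih']
    simp [pvCJ, String.toList_append]

-- A's trailing 'if bytes_on_line > 0' flush
def pvFin (st : String × String × Int) : String :=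
  if st.2.2 > 0 then st.1 ++ st.2.1 ++ "\n" else st.1

-- A's loop across the tail of one output line: from a state with 0 < k < step bytes on the
-- line, processing c with k + |c| ≤ step either completes the line exactly (flush) or extends it
theorem pvChunk (start_line byte_prefix : String) (bytes_per_line : Int) (c : List Int) :
    ∀ (k : Nat) (asm j : String), j ≠ "" → 0 < k → k < pvStep bytes_per_line →
    k + c.length ≤ pvStep bytes_per_line →
    c.foldl (pvAStep start_line byte_prefix bytes_per_line) (asm, start_line ++ j, (k : Int)) =
      if k + c.length = pvStep bytes_per_line
      then (asm ++ (start_line ++ (j ++ pvCJ byte_prefix c)) ++ "\n", start_line, (0 : Int))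
      else (asm, start_line ++ (j ++ pvCJ byte_prefix c), ((k + c.length : Nat) : Int)) := by
  induction c with
  | nil =>
    intro k asm j hj hk hks _
    rw [List.foldl_nil, if_neg (by simp; omega)]
    simp [pvCJ]
  | cons b c ih =>
    intro k asm j hj hk hks hlen
    rw [List.foldl_cons]
    have hstep : pvAStep start_line byte_prefix bytes_per_line (asm, start_line ++ j, (k : Int)) b
        = if (k : Int) + 1 ≥ bytes_per_line
          then (asm ++ (start_line ++ (j ++ ("," ++ pvF byte_prefix b))) ++ "\n", start_line, (0:Int))
          else (asm, start_line ++ (j ++ ("," ++ pvF byte_prefix b)), (k : Int) + 1) := by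
      simp only [pvAStep, pv_beq_append_self start_line j hj, Bool.false_eq_true, if_false]
      simp [pvF, String.append_assoc]
    rw [hstep]
    by_cases hfl : k + 1 ≥ pvStep bytes_per_line
    · -- flush after this byte; k+1 = step forces c = []
      have hkk : k + 1 = pvStep bytes_per_line := by omega
      have hc : c = [] := by
        simp only [List.length_cons] at hlen
        have : c.length = 0 := by omega
        exact List.length_eq_zero_iff.mp this
      subst hc
      rw [if_pos ((pvFlush bytes_per_line k).mpr hfl)]
      rw [List.foldl_nil, if_pos (by simp; omega)]
      simp [pvCJ, String.append_assoc]
    · rw [if_neg (fun h => hfl ((pvFlush bytes_per_line k).mp h))]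
      have hcast : (k : Int) + 1 = ((k + 1 : Nat) : Int) := by push_cast; ring
      rw [hcast]
      rw [ih (k + 1) asm (j ++ ("," ++ pvF byte_prefix b))
        (pv_append_ne_empty_left _ _ hj) (by omega) (by omega)
        (by simp only [List.length_cons] at hlen; omega)]
      have hiff : (k + 1 + c.length = pvStep bytes_per_line)
          ↔ (k + (b :: c).length = pvStep bytes_per_line) := by simp; omega
      by_cases hq : k + 1 + c.length = pvStep bytes_per_line
      · rw [if_pos hq, if_pos (hiff.mp hq)]
        simp [pvCJ, String.append_assoc]
      · rw [if_neg hq, if_neg (fun h => hq (hiff.mpr h))]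
        simp only [Prod.mk.injEq]
        refine ⟨trivial, ?_, ?_⟩
        · simp [pvCJ, String.append_assoc]
        · simp only [List.length_cons]; push_cast; ring

-- A's whole loop plus the final flush equals B's chunked output
theorem pvTop (start_line byte_prefix : String) (bytes_per_line : Int) :
    ∀ (n : Nat) (rem : List Int), rem.length ≤ n → ∀ asm : String,
    pvFin (rem.foldl (pvAStep start_line byte_prefix bytes_per_line) (asm, start_line, (0 : Int)))
    = asm ++ pvLines start_line byte_prefix (pvStep bytes_per_line) (pvStep_pos bytes_per_line) rem := by
  intro n
  induction n with
  | zero =>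
    intro rem hlen asm
    have : rem = [] := List.length_eq_zero_iff.mp (by omega)
    subst this
    rw [pvLines]
    simp [pvFin]
  | succ n ih =>
    intro rem hlen asm
    match rem with
    | [] => rw [pvLines]; simp [pvFin]
    | b :: r0 =>
      simp only [List.foldl_cons]
      have hstep1 : pvAStep start_line byte_prefix bytes_per_line (asm, start_line, (0 : Int)) b
          = if (0 : Int) + 1 ≥ bytes_per_line
            then (asm ++ (start_line ++ pvF byte_prefix b) ++ "\n", start_line, (0:Int))
            else (asm, start_line ++ pvF byte_prefix b, (1 : Int)) := by
      -- first byte of a line: current_line == start_line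
        simp only [pvAStep, beq_self_eq_true, if_true]
        simp [pvF, String.append_assoc]
      rw [hstep1]
      have hflush1 : ((0 : Int) + 1 ≥ bytes_per_line) ↔ (1 ≥ pvStep bytes_per_line) := by
        have := pvFlush bytes_per_line 0
        simpa using this
      by_cases h1 : (1 : Nat) ≥ pvStep bytes_per_line
      · -- step = 1 : every byte is its own line
        have hs1 : pvStep bytes_per_line = 1 := by have := pvStep_pos bytes_per_line; omega
        rw [if_pos (hflush1.mpr h1)]
        rw [ih r0 (by simpa using hlen) (asm ++ (start_line ++ pvF byte_prefix b) ++ "\n")]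
        conv_rhs => rw [pvLines]
        rw [dif_neg (List.cons_ne_nil b r0)]
        have hfun : (fun b => byte_prefix ++ pvFmt02x (if b < 0 then 256 + b else b)) = pvF byte_prefix := rfl
        have htk1 : (b :: r0).take 1 = [b] := by simp
        rw [hfun]
        simp only [hs1, htk1, List.drop_one, List.tail_cons, List.map_cons, List.map_nil]
        rw [show PySem.Str.join "," [pvF byte_prefix b] = pvF byte_prefix b ++ pvCJ byte_prefix [] from pv_join_cons byte_prefix b []]
        simp [pvCJ, pvFin, String.append_assoc]
      · rw [if_neg (fun h => h1 (hflush1.mp h))]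
        have hs2 : 2 ≤ pvStep bytes_per_line := by omega
        by_cases hsmall : 1 + r0.length ≤ pvStep bytes_per_line
        · -- the whole remaining input fits on this line
          have hch := pvChunk start_line byte_prefix bytes_per_line r0 1 asm
            (pvF byte_prefix b) (pvF_ne _ _) (by omega) (by omega) (by omega)
          rw [show ((1 : Int)) = ((1 : Nat) : Int) from rfl, hch]
          conv_rhs => rw [pvLines]
          rw [dif_neg (List.cons_ne_nil b r0)]
          have hfun : (fun b => byte_prefix ++ pvFmt02x (if b < 0 then 256 + b else b)) = pvF byte_prefix := rfl
          have htk : (b :: r0).take (pvStep bytes_per_line) = b :: r0 :=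
            List.take_of_length_le (by simp; omega)
          have hdr : (b :: r0).drop (pvStep bytes_per_line) = [] :=
            List.drop_eq_nil_of_le (by simp; omega)
          rw [hfun, htk, hdr, List.map_cons, pv_join_cons, pvLines]
          by_cases hq : 1 + r0.length = pvStep bytes_per_line
          · rw [if_pos (by simpa using hq)]
            simp [pvFin, String.append_assoc]
          · rw [if_neg (by simpa using hq)]
            have hpos : ((1 + r0.length : Nat) : Int) > 0 := by push_cast; omega
            simp only [pvFin, hpos, if_pos]
            simp [String.append_assoc]
        · -- the line fills after step-1 more bytes, then recurse on the rest
          obtain ⟨m, hm⟩ : ∃ m, pvStep bytes_per_line = m + 1 :=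
            ⟨pvStep bytes_per_line - 1, by have := pvStep_pos bytes_per_line; omega⟩
          have hmlen : m ≤ r0.length := by omega
          have hr0 : r0 = r0.take m ++ r0.drop m := (List.take_append_drop m r0).symm
          rw [show r0.foldl (pvAStep start_line byte_prefix bytes_per_line)
                (asm, start_line ++ pvF byte_prefix b, (1:Int))
              = (r0.take m ++ r0.drop m).foldl (pvAStep start_line byte_prefix bytes_per_line)
                (asm, start_line ++ pvF byte_prefix b, (1:Int)) from by rw [← hr0]]
          rw [List.foldl_append]
          have hltk : (r0.take m).length = m := List.length_take_of_le hmlen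
          have hch := pvChunk start_line byte_prefix bytes_per_line (r0.take m) 1 asm
            (pvF byte_prefix b) (pvF_ne _ _) (by omega) (by omega) (by rw [hltk]; omega)
          rw [hltk] at hch
          rw [show ((1 : Int)) = ((1 : Nat) : Int) from rfl, hch, if_pos (by omega)]
          have hlen2 : (r0.drop m).length ≤ n := by
            simp only [List.length_cons] at hlen
            simp only [List.length_drop]
            omega
          rw [ih (r0.drop m) hlen2]
          conv_rhs => rw [pvLines]
          rw [dif_neg (List.cons_ne_nil b r0)]
          have hfun : (fun b => byte_prefix ++ pvFmt02x (if b < 0 then 256 + b else b)) = pvF byte_prefix := rfl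
          have htk : (b :: r0).take (pvStep bytes_per_line) = b :: r0.take m := by
            rw [hm, List.take_succ_cons]
          have hdr : (b :: r0).drop (pvStep bytes_per_line) = r0.drop m := by
            rw [hm, List.drop_succ_cons]
          rw [hfun, htk, hdr, List.map_cons, pv_join_cons]
          simp [String.append_assoc]

theorem pv_join_empty_cons (x : String) (xs : List String) :
    PySem.Str.join "" (x :: xs) = x ++ PySem.Str.join "" xs := by
  cases xs with
  | nil =>
    apply String.toList_inj.mp
    simp [PySem.Str.toList_join, PySem.Chars.join_singleton, PySem.Chars.join_nil]
  | cons y ys =>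
    apply String.toList_inj.mp
    have hcc := PySem.Chars.join_cons_cons "".toList x.toList y.toList (ys.map String.toList)
    simp only [PySem.Str.toList_join, List.map_cons] at hcc ⊢
    simp at hcc
    simp [hcc, String.toList_append]

-- B's index loop, joined, emits the chunked lines of the not-yet-output suffix
theorem pvAltGo_eq_pvLines (start_line byte_prefix : String) (step : Nat) (hs : 0 < step)
    (bytes : List Int) : ∀ (n i : Nat), bytes.length - i ≤ n →
    PySem.Str.join "" (pvAltGo start_line byte_prefix step hs bytes i)
      = pvLines start_line byte_prefix step hs (bytes.drop i) := by
  intro n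
  induction n with
  | zero =>
    intro i hi
    rw [pvAltGo, dif_neg (by omega), pvLines, dif_pos (List.drop_eq_nil_of_le (by omega))]
    apply String.toList_inj.mp
    simp [PySem.Str.toList_join, PySem.Chars.join_nil]
  | succ n ih =>
    intro i hi
    by_cases h : i < bytes.length
    · rw [pvAltGo, dif_pos h, pvLines,
        dif_neg (by simp only [List.drop_eq_nil_iff]; omega)]
      rw [pv_join_empty_cons, pv_join_empty_cons, pv_join_empty_cons, ih (i + step) (by omega)]
      rw [PySem.List.slice_natCast_add]
      rw [show bytes.drop (i + step) = (bytes.drop i).drop step from by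
        rw [List.drop_drop]]
      simp [String.append_assoc]
    · rw [pvAltGo, dif_neg h, pvLines, dif_pos (List.drop_eq_nil_of_le (by omega))]
      apply String.toList_inj.mp
      simp [PySem.Str.toList_join, PySem.Chars.join_nil]

-- ===== VERDICT (by name: the statement is the Claim_ definition above) =====
theorem generate_asm_from_bytes_spec : Claim_equal_generate_asm_from_bytes := by
  intro bytes bytes_per_line start_line byte_prefix _
  unfold Spec_generate_asm_from_bytes generate_asm_from_bytes_alt
  show pvFin (bytes.foldl (pvAStep start_line byte_prefix bytes_per_line) ("", start_line, 0))
    = PySem.Str.join ""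
        (pvAltGo start_line byte_prefix (pvStep bytes_per_line) (pvStep_pos bytes_per_line) bytes 0)
  rw [pvAltGo_eq_pvLines start_line byte_prefix (pvStep bytes_per_line) (pvStep_pos bytes_per_line)
    bytes bytes.length 0 (by omega)]
  have := pvTop start_line byte_prefix bytes_per_line bytes.length bytes le_rfl ""
  simpa using this
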